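-- pv_equiv track=rewrite | github.com/begin923/SQLBot | backend/apps/extend/metrics/parse_md_to_json.py | parse_markdown_table_row
-- ===== SOURCE A (Python) =====
-- from typing import Dict, List, Any, Optional
--
-- def parse_markdown_table_row(row: str) -> List[str]:
--     """解析 Markdown 表格行，正确处理单元格内的逗号和管道符"""
--     # 去掉首尾的 | 和空格
--     row = row.strip()
--     if row.startswith('|'):
--         row = row[1:]
--     if row.endswith('|'):
--         row = row[:-1]
--
--     # 分割单元格
--     cells = []
--     current_cell = ''
--     in_pipe_count = 0
--
--     for char in row:
--         if char == '|' and (not current_cell or current_cell[-1] != '\\'):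
--             # 遇到管道符（且不是转义的），完成当前单元格
--             cells.append(current_cell.strip())
--             current_cell = ''
--         else:
--             current_cell += char
--
--     # 添加最后一个单元格
--     if current_cell:
--         cells.append(current_cell.strip())
--
--     return cells
-- ===== SOURCE B (Python) =====
-- def parse_markdown_table_row(row):
--     """Staged mask-split-restore: escaped pipes are masked with a sentinel
--     character (which cannot occur in the printable-ASCII input), the row is
--     split on the remaining (unescaped) pipes, and the sentinel is restored to
--     the literal backslash-pipe sequence; cells are then stripped, with a
--     trailing empty part dropped."""
--     row = row.strip()
--     if row.startswith('|'):
--         row = row[1:]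
--     if row.endswith('|'):
--         row = row[:-1]
--
--     SENTINEL = '\x00'
--     masked = row.replace('\\|', SENTINEL)
--     parts = [p.replace(SENTINEL, '\\|') for p in masked.split('|')]
--     cells = [p.strip() for p in parts]
--     if parts[-1] == '':
--         cells.pop()
--     return cells
-- ===== Notes on version B (the rewrite author's own statement) =====
-- stated objective: faster
-- what changed: A does a manual per-character Python loop with a current-cell string accumulator and an escape test on the cell's last character; B has no scanning loop at all: it masks escaped pipes with a sentinel character via str.replace, splits on the remaining unescaped pipes with str.split, restores the sentinel, then strips the parts and drops a trailing empty part.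
import Mathlib
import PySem

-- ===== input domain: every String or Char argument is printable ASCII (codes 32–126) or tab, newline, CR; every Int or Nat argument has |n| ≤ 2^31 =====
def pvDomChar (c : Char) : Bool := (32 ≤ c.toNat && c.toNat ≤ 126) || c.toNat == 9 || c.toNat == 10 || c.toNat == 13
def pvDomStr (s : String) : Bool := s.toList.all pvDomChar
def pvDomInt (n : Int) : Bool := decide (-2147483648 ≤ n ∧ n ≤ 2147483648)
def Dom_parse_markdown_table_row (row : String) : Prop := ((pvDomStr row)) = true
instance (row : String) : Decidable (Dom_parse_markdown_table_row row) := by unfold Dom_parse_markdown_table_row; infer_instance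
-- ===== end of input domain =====

-- B replaces A's per-character scan (escape test on the accumulated cell's last char) with a
-- staged mask-split-restore pipeline over library string operations (objective: faster, measured).

-- ===== PORT A =====
-- the three leading strip/slice lines are identical in Source A and Source B; shared as pvPrep
def pvR0 (row : String) : List Char := PySem.Chars.strip row.toList
def pvR1 (row : String) : List Char :=
  if PySem.Chars.startswith (pvR0 row) ['|'] then PySem.List.slice (pvR0 row) (some 1) none else pvR0 row
def pvPrep (row : String) : List Char :=
  if PySem.Chars.endswith (pvR1 row) ['|'] then PySem.List.slice (pvR1 row) none (some (-1)) else pvR1 row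

-- A's for-loop: state (remaining chars, current_cell); cells are emitted in order
def pvLoopA : List Char → List Char → List String
  | [], cur => if cur = [] then [] else [String.ofList (PySem.Chars.strip cur)]
  | c :: rest, cur =>
      if c = '|' ∧ (cur = [] ∨ cur.getLast? ≠ some '\\') then
        String.ofList (PySem.Chars.strip cur) :: pvLoopA rest []
      else
        pvLoopA rest (cur ++ [c])

def parse_markdown_table_row (row : String) : List String :=
  pvLoopA (pvPrep row) []

-- ===== PORT B =====
-- Source B's pipeline: mask '\|' with the sentinel '\x00' (str.replace), split on the remaining
-- unescaped '|' (str.split), restore the sentinel (str.replace), strip each part, and drop a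
-- trailing empty part (Source B's `if parts[-1] == '': cells.pop()`; split always returns ≥ 1 part)
def parse_markdown_table_row_alt (row : String) : List String :=
  let masked := PySem.Chars.replace (pvPrep row) ['\\', '|'] [Char.ofNat 0]
  let parts := (PySem.Chars.splitOn masked ['|']).map
    (fun p => PySem.Chars.replace p [Char.ofNat 0] ['\\', '|'])
  let cells := parts.map (fun p => String.ofList (PySem.Chars.strip p))
  if parts.getLast? = some [] then cells.dropLast else cells

-- ===== PRECONDITION & SPEC =====
def Spec_parse_markdown_table_row (row : String) (out : List String) : Prop := out = parse_markdown_table_row_alt row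
instance (row : String) (out : List String) : Decidable (Spec_parse_markdown_table_row row out) := by unfold Spec_parse_markdown_table_row; infer_instance

-- ===== CLAIM (what is proved, stated in full; the proofs are below) =====
def Claim_equal_parse_markdown_table_row : Prop := ∀ (row : String), Dom_parse_markdown_table_row row → Spec_parse_markdown_table_row row (parse_markdown_table_row row)

-- ===== LEMMAS AND PROOFS =====

-- structural form of str.replace('\\|', '\x00') (greedy left-to-right, nonoverlapping)
def pvMask : List Char → List Char
  | [] => []
  | c :: t =>
      if c = '\\' ∧ t.head? = some '|' then Char.ofNat 0 :: pvMask t.tail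
      else c :: pvMask t
termination_by l => l.length
decreasing_by
  · simp only [List.length_cons]
    have : t.tail.length ≤ t.length := by cases t <;> simp
    omega
  · simp

-- structural form of str.replace('\x00', '\\|')
def pvUnmask : List Char → List Char
  | [] => []
  | c :: t => if c = Char.ofNat 0 then '\\' :: '|' :: pvUnmask t else c :: pvUnmask t

-- structural form of str.split('|'): first part and the later parts
def pvSplitBar : List Char → List Char × List (List Char)
  | [] => ([], [])
  | c :: t =>
      let r := pvSplitBar t
      if c = '|' then ([], r.1 :: r.2) else (c :: r.1, r.2)

-- Source B's postprocessing: strip every part, pop the last cell if the last part is empty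
def pvFinB (p : List Char) (ps : List (List Char)) : List String :=
  let cells := (p :: ps).map (fun q => String.ofList (PySem.Chars.strip q))
  if (p :: ps).getLast (List.cons_ne_nil _ _) = [] then cells.dropLast else cells

lemma pvReplaceGo_mask (fuel : Nat) : ∀ (l acc : List Char), l.length ≤ fuel →
    PySem.Chars.replace.go ['\\', '|'] [Char.ofNat 0] fuel l acc = acc.reverse ++ pvMask l := by
  induction fuel with
  | zero =>
      intro l acc hlen
      have : l = [] := List.eq_nil_of_length_eq_zero (Nat.le_zero.mp hlen)
      subst this
      simp [PySem.Chars.replace.go, pvMask]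
  | succ n ih =>
      intro l acc hlen
      match l with
      | [] => simp [PySem.Chars.replace.go, pvMask]
      | c :: t =>
          rw [PySem.Chars.replace.go]
          by_cases h : c = '\\' ∧ t.head? = some '|'
          · obtain ⟨t2, ht⟩ : ∃ t2, t = '|' :: t2 := by cases t <;> simp_all
            subst ht; obtain ⟨rfl, -⟩ := h
            have hpre : List.isPrefixOf ['\\', '|'] ('\\' :: '|' :: t2) = true := by
              rw [List.isPrefixOf_iff_prefix]; exact ⟨t2, rfl⟩
            rw [if_pos hpre]
            have hdrop : List.drop (['\\', '|'].length) ('\\' :: '|' :: t2) = t2 := rfl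
            rw [hdrop, ih t2 _ (by simp only [List.length_cons] at hlen; omega)]
            rw [pvMask, if_pos ⟨rfl, rfl⟩]
            simp
          · have hpre : List.isPrefixOf ['\\', '|'] (c :: t) = false := by
              by_contra hx
              rw [Bool.not_eq_false, List.isPrefixOf_iff_prefix] at hx
              obtain ⟨s, hs⟩ := hx
              simp only [List.cons_append, List.nil_append, List.cons.injEq] at hs
              exact h ⟨hs.1.symm, by rw [← hs.2]; simp⟩
            rw [hpre]
            simp only [Bool.false_eq_true, if_false]
            rw [ih t _ (by simp only [List.length_cons] at hlen; omega)]
            rw [pvMask, if_neg h]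
            simp
lemma pvReplace_mask (l : List Char) :
    PySem.Chars.replace l ['\\', '|'] [Char.ofNat 0] = pvMask l := by
  rw [PySem.Chars.replace]
  simp only [List.isEmpty_cons, Bool.false_eq_true, if_false]
  exact (pvReplaceGo_mask l.length l [] le_rfl).trans (by simp)

lemma pvReplaceGo_unmask (fuel : Nat) : ∀ (l acc : List Char), l.length ≤ fuel →
    PySem.Chars.replace.go [Char.ofNat 0] ['\\', '|'] fuel l acc = acc.reverse ++ pvUnmask l := by
  induction fuel with
  | zero =>
      intro l acc hlen
      have : l = [] := List.eq_nil_of_length_eq_zero (Nat.le_zero.mp hlen)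
      subst this
      simp [PySem.Chars.replace.go, pvUnmask]
  | succ n ih =>
      intro l acc hlen
      match l with
      | [] => simp [PySem.Chars.replace.go, pvUnmask]
      | c :: t =>
          rw [PySem.Chars.replace.go]
          by_cases h : c = Char.ofNat 0
          · subst h
            have hpre : List.isPrefixOf [Char.ofNat 0] (Char.ofNat 0 :: t) = true := by
              rw [List.isPrefixOf_iff_prefix]; exact ⟨t, rfl⟩
            rw [if_pos hpre]
            have hdrop : List.drop ([Char.ofNat 0].length) (Char.ofNat 0 :: t) = t := rfl
            rw [hdrop, ih t _ (by simp only [List.length_cons] at hlen; omega)]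
            rw [pvUnmask, if_pos rfl]
            simp
          · have hpre : List.isPrefixOf [Char.ofNat 0] (c :: t) = false := by
              by_contra hx
              rw [Bool.not_eq_false, List.isPrefixOf_iff_prefix] at hx
              obtain ⟨s, hs⟩ := hx
              simp only [List.cons_append, List.nil_append, List.cons.injEq] at hs
              exact h hs.1.symm
            rw [hpre]
            simp only [Bool.false_eq_true, if_false]
            rw [ih t _ (by simp only [List.length_cons] at hlen; omega)]
            rw [pvUnmask, if_neg h]
            simp
lemma pvReplace_unmask (l : List Char) :
    PySem.Chars.replace l [Char.ofNat 0] ['\\', '|'] = pvUnmask l := by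
  rw [PySem.Chars.replace]
  simp only [List.isEmpty_cons, Bool.false_eq_true, if_false]
  exact (pvReplaceGo_unmask l.length l [] le_rfl).trans (by simp)

lemma pvSplitGo (fuel : Nat) : ∀ (l cur : List Char) (acc : List (List Char)), l.length < fuel →
    PySem.Chars.splitOn.go ['|'] fuel l cur acc =
      acc.reverse ++ (cur.reverse ++ (pvSplitBar l).1) :: (pvSplitBar l).2 := by
  induction fuel with
  | zero => intro l cur acc h; omega
  | succ n ih =>
      intro l cur acc hlen
      match l with
      | [] => simp [PySem.Chars.splitOn.go, pvSplitBar]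
      | c :: t =>
          rw [PySem.Chars.splitOn.go]
          by_cases h : c = '|'
          · subst h
            have hpre : List.isPrefixOf ['|'] ('|' :: t) = true := by
              rw [List.isPrefixOf_iff_prefix]; exact ⟨t, rfl⟩
            rw [if_pos hpre]
            have hdrop : List.drop (['|'].length) ('|' :: t) = t := rfl
            rw [hdrop, ih t [] _ (by simp only [List.length_cons] at hlen; omega)]
            rw [pvSplitBar]
            simp
          · have hpre : List.isPrefixOf ['|'] (c :: t) = false := by
              by_contra hx
              rw [Bool.not_eq_false, List.isPrefixOf_iff_prefix] at hx
              obtain ⟨s, hs⟩ := hx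
              simp only [List.cons_append, List.nil_append, List.cons.injEq] at hs
              exact h hs.1.symm
            rw [hpre]
            simp only [Bool.false_eq_true, if_false]
            rw [ih t (c :: cur) _ (by simp only [List.length_cons] at hlen; omega)]
            rw [pvSplitBar]
            simp [h]
lemma pvSplitOn_bar (l : List Char) :
    PySem.Chars.splitOn l ['|'] = ((pvSplitBar l).1) :: (pvSplitBar l).2 := by
  rw [PySem.Chars.splitOn]
  exact (pvSplitGo (l.length + 1) l [] [] (by omega)).trans (by simp)

lemma pvFinB_nil (p : List Char) :
    pvFinB p [] = if p = [] then [] else [String.ofList (PySem.Chars.strip p)] := by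
  unfold pvFinB
  by_cases h : p = [] <;> simp [h]

lemma pvFinB_cons (p q : List Char) (qs : List (List Char)) :
    pvFinB p (q :: qs) = String.ofList (PySem.Chars.strip p) :: pvFinB q qs := by
  unfold pvFinB
  rw [List.getLast_cons (List.cons_ne_nil q qs)]
  by_cases h : (q :: qs).getLast (List.cons_ne_nil q qs) = [] <;>
    simp [h, List.dropLast_cons_of_ne_nil]

-- the main correspondence: A's scan equals B's mask/split/restore on sentinel-free input
lemma pvMain (n : Nat) : ∀ (rest cur : List Char), rest.length ≤ n →
    (cur.getLast? = some '\\' → rest.head? ≠ some '|') →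
    Char.ofNat 0 ∉ rest →
    pvLoopA rest cur =
      pvFinB (cur ++ pvUnmask (pvSplitBar (pvMask rest)).1)
        ((pvSplitBar (pvMask rest)).2.map pvUnmask) := by
  induction n with
  | zero =>
      intro rest cur hlen _ _
      have : rest = [] := List.eq_nil_of_length_eq_zero (Nat.le_zero.mp hlen)
      subst this
      simp [pvLoopA, pvMask, pvSplitBar, pvUnmask, pvFinB_nil]
  | succ n ih =>
      intro rest cur hlen hinv hnul
      match rest with
      | [] => simp [pvLoopA, pvMask, pvSplitBar, pvUnmask, pvFinB_nil]
      | c :: t =>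
        have hnul' : Char.ofNat 0 ∉ t := fun h => hnul (List.mem_cons_of_mem _ h)
        have hcnul : c ≠ Char.ofNat 0 := fun h => hnul (h ▸ List.mem_cons_self)
        by_cases hc : c = '\\'
        · subst hc
          have hA : pvLoopA ('\\' :: t) cur = pvLoopA t (cur ++ ['\\']) := by
            simp [pvLoopA]
          by_cases hh : t.head? = some '|'
          · obtain ⟨t2, ht⟩ : ∃ t2, t = '|' :: t2 := by cases t <;> simp_all
            subst ht
            have hA2 : pvLoopA ('|' :: t2) (cur ++ ['\\']) =
                pvLoopA t2 ((cur ++ ['\\']) ++ ['|']) := by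
              simp [pvLoopA]
            have hIH := ih t2 ((cur ++ ['\\']) ++ ['|'])
              (by simp only [List.length_cons] at hlen; omega)
              (by intro h; simp at h)
              (fun h => hnul' (List.mem_cons_of_mem _ h))
            rw [hA, hA2, hIH, pvMask]
            rw [if_pos ⟨rfl, rfl⟩]
            simp only [List.tail_cons, pvSplitBar]
            rw [if_neg (by decide)]
            simp [pvUnmask, List.append_assoc]
          · have hIH := ih t (cur ++ ['\\'])
              (by simp only [List.length_cons] at hlen; omega)
              (fun _ => hh) hnul'
            rw [hA, hIH, pvMask]
            rw [if_neg (by intro h; exact hh h.2)]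
            simp only [pvSplitBar]
            rw [if_neg (by decide)]
            simp only [pvUnmask]
            rw [if_neg (by decide)]
            simp [List.append_assoc]
        · by_cases hp : c = '|'
          · subst hp
            have hsplit : cur = [] ∨ cur.getLast? ≠ some '\\' := by
              rcases Decidable.em (cur = []) with h | h
              · exact Or.inl h
              · right; intro hl; exact (hinv hl) (by simp)
            have hA : pvLoopA ('|' :: t) cur =
                String.ofList (PySem.Chars.strip cur) :: pvLoopA t [] := by
              simp [pvLoopA, hsplit]
            have hIH := ih t [] (by simp only [List.length_cons] at hlen; omega)
              (by intro h; simp at h) hnul'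
            rw [hA, hIH, pvMask]
            rw [if_neg (by intro h; exact hc h.1)]
            simp [pvSplitBar, pvUnmask, pvFinB_cons]
          · have hA : pvLoopA (c :: t) cur = pvLoopA t (cur ++ [c]) := by
              simp [pvLoopA, hp]
            have hIH := ih t (cur ++ [c])
              (by simp only [List.length_cons] at hlen; omega)
              (by intro h; simp at h; simp [h] at hc) hnul'
            rw [hA, hIH, pvMask]
            rw [if_neg (by intro h; exact hc h.1)]
            simp only [pvSplitBar]
            rw [if_neg hp]
            simp only [pvUnmask]
            rw [if_neg hcnul]
            simp [List.append_assoc]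

-- B's final `if parts.getLast? = some []` agrees with pvFinB's getLast condition
lemma pvFinB_eq_pipeline (p : List Char) (ps : List (List Char)) :
    pvFinB p ps =
      (if (p :: ps).getLast? = some [] then
        ((p :: ps).map (fun q => String.ofList (PySem.Chars.strip q))).dropLast
      else (p :: ps).map (fun q => String.ofList (PySem.Chars.strip q))) := by
  unfold pvFinB
  rw [List.getLast?_eq_some_getLast (List.cons_ne_nil p ps)]
  by_cases h : (p :: ps).getLast (List.cons_ne_nil p ps) = [] <;> simp [h]

-- the input A/B actually scan contains no sentinel char when the row is in Dom
lemma pvNoNul_strip (l : List Char) (h : Char.ofNat 0 ∉ l) :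
    Char.ofNat 0 ∉ PySem.Chars.strip l := by
  intro hmem
  apply h
  unfold PySem.Chars.strip PySem.Chars.rstrip PySem.Chars.lstrip at hmem
  rw [List.mem_reverse] at hmem
  have h2 := (List.dropWhile_sublist _).mem hmem
  rw [List.mem_reverse] at h2
  exact (List.dropWhile_sublist _).mem h2

lemma pvNoNul_slice (l : List Char) (a b : Option Int) (h : Char.ofNat 0 ∉ l) :
    Char.ofNat 0 ∉ PySem.List.slice l a b := by
  intro hmem
  unfold PySem.List.slice at hmem
  exact h ((List.take_sublist _ _).mem hmem |> (List.drop_sublist _ _).mem)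

lemma pvNoNul_prep (row : String) (h : Char.ofNat 0 ∉ row.toList) :
    Char.ofNat 0 ∉ pvPrep row := by
  have h0 : Char.ofNat 0 ∉ pvR0 row := pvNoNul_strip _ h
  have h1 : Char.ofNat 0 ∉ pvR1 row := by
    unfold pvR1
    split
    · exact pvNoNul_slice _ _ _ h0
    · exact h0
  unfold pvPrep
  split
  · exact pvNoNul_slice _ _ _ h1
  · exact h1

-- ===== VERDICT (by name: the statement is the Claim_ definition above) =====
theorem parse_markdown_table_row_spec : Claim_equal_parse_markdown_table_row := by
  intro row hdom
  have hnul0 : Char.ofNat 0 ∉ row.toList := by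
    intro hmem
    exact absurd (List.all_eq_true.mp hdom _ hmem) (by decide)
  have hnul := pvNoNul_prep row hnul0
  unfold Spec_parse_markdown_table_row parse_markdown_table_row parse_markdown_table_row_alt
  rw [pvMain (pvPrep row).length (pvPrep row) [] le_rfl (by intro h; simp at h) hnul]
  simp only [pvReplace_mask, pvSplitOn_bar, List.map_cons, pvReplace_unmask]
  rw [pvFinB_eq_pipeline]
  simp
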